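-- pv_equiv track=rewrite | github.com/AlwaysTraining/patnlp-hsm | hsm/data/importer/util.py | compute_ends
-- ===== SOURCE A (Python) =====
-- def compute_ends(tokens, sep=u' '):
--     '''Compute end positions of tokens, if they were joined by given separator as a single string.'''
--     ends = []
--     if len(tokens) == 0:
--         return ends
--     else:
--         seplen = len(sep)
--         next_end = len(tokens[0])
--         for token in tokens[1:]:
--             ends.append(next_end)
--             next_end += seplen + len(token)
--         ends.append(next_end)
--         return ends
-- ===== SOURCE B (Python) =====
-- def compute_ends(tokens, sep=u' '):
--     '''Compute end positions of tokens, if they were joined by given separator as a single string.'''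
--     prefix = []
--     total = 0
--     for t in tokens:
--         total += len(t)
--         prefix.append(total)
--     return [c + i * len(sep) for i, c in enumerate(prefix)]
-- ===== Notes on version B (the rewrite author's own statement) =====
-- stated objective: alternative
-- what changed: Replaces the lagged running sum with first-token special case by a prefix-sum table of token lengths followed by an enumerate pass adding i*len(sep) per token.
import Mathlib
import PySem

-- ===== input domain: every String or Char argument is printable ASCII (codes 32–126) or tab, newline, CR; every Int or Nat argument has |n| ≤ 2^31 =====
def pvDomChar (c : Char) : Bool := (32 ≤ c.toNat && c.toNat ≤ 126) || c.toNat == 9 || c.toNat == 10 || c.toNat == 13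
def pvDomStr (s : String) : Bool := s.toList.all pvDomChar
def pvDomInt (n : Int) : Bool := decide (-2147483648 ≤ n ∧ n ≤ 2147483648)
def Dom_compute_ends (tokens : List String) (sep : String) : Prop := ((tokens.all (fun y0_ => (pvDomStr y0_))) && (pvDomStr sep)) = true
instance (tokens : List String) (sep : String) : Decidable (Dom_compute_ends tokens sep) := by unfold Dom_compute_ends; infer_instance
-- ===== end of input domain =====

-- B replaces A's lagged running sum (with first-token special case) by a prefix-sum
-- table of token lengths plus an enumerate pass adding i*len(sep); same O(n) cost.


-- ===== PORT A =====
def compute_ends (tokens : List String) (sep : String) : List Int :=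
  match tokens with
  | [] => []
  | t0 :: rest =>
    let seplen : Int := PySem.Str.len sep
    let st := rest.foldl
      (fun (st : List Int × Int) token => (st.1 ++ [st.2], st.2 + (seplen + PySem.Str.len token)))
      (([] : List Int), PySem.Str.len t0)
    st.1 ++ [st.2]

-- ===== PORT B =====
def compute_ends_alt (tokens : List String) (sep : String) : List Int :=
  let pfx := (tokens.foldl
      (fun (st : List Int × Int) t =>
        let total := st.2 + PySem.Str.len t
        (st.1 ++ [total], total))
      (([] : List Int), 0)).1
  (PySem.List.enumerate pfx).map (fun p => p.2 + p.1 * PySem.Str.len sep)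

-- ===== PRECONDITION & SPEC =====
def Spec_compute_ends (tokens : List String) (sep : String) (out : List Int) : Prop := out = compute_ends_alt tokens sep
instance (tokens : List String) (sep : String) (out : List Int) : Decidable (Spec_compute_ends tokens sep out) := by unfold Spec_compute_ends; infer_instance

-- ===== CLAIM (what is proved, stated in full; the proofs are below) =====
def Claim_equal_compute_ends : Prop := ∀ (tokens : List String) (sep : String), Dom_compute_ends tokens sep → Spec_compute_ends tokens sep (compute_ends tokens sep)

-- ===== LEMMAS AND PROOFS =====

-- abstract shape both programs produce: g s base ls = [base+l₁, base+l₁+s+l₂, …]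
def pvG (s : Int) : Int → List Int → List Int
  | _, [] => []
  | base, l :: ls => (base + l) :: pvG s (base + l + s) ls

-- prefix sums with running total
def pvPfx : Int → List Int → List Int
  | _, [] => []
  | tot, l :: ls => (tot + l) :: pvPfx (tot + l) ls

lemma pvA_fold (s : Int) (ls : List Int) : ∀ (acc : List Int) (cur : Int),
    (ls.foldl (fun (st : List Int × Int) l => (st.1 ++ [st.2], st.2 + (s + l))) (acc, cur)).1
      ++ [(ls.foldl (fun (st : List Int × Int) l => (st.1 ++ [st.2], st.2 + (s + l))) (acc, cur)).2]
      = acc ++ cur :: pvG s (cur + s) ls := by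
  induction ls with
  | nil => intro acc cur; simp [pvG]
  | cons l ls ih =>
      intro acc cur
      simp only [List.foldl_cons, pvG]
      rw [ih]
      simp only [List.append_assoc, List.cons_append, List.nil_append]
      have : cur + (s + l) = cur + s + l := by ring
      rw [this]

lemma pvB_fold (ls : List Int) : ∀ (acc : List Int) (tot : Int),
    (ls.foldl (fun (st : List Int × Int) l => (st.1 ++ [st.2 + l], st.2 + l)) (acc, tot)).1
      = acc ++ pvPfx tot ls := by
  induction ls with
  | nil => intro acc tot; simp [pvPfx]
  | cons l ls ih =>
      intro acc tot
      simp only [List.foldl_cons, pvPfx]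
      rw [ih]; simp

lemma pvEnum_pfx (s : Int) (ls : List Int) : ∀ (tot k : Int),
    (PySem.List.enumerate (pvPfx tot ls) k).map (fun p => p.2 + p.1 * s)
      = pvG s (tot + k * s) ls := by
  induction ls with
  | nil => intro tot k; simp [pvPfx, pvG]
  | cons l ls ih =>
      intro tot k
      simp only [pvPfx, pvG, PySem.List.enumerate_cons, List.map_cons]
      rw [ih]
      congr 1
      · ring
      · congr 1; ring

-- ===== VERDICT (by name: the statement is the Claim_ definition above) =====
theorem compute_ends_spec : Claim_equal_compute_ends := by
  intro tokens sep _
  unfold Spec_compute_ends compute_ends compute_ends_alt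
  cases tokens with
  | nil => simp
  | cons t0 rest =>
      simp only []
      have hA := pvA_fold (PySem.Str.len sep) (rest.map PySem.Str.len) [] (PySem.Str.len t0)
      rw [List.foldl_map] at hA
      have hB := pvB_fold ((t0 :: rest).map PySem.Str.len) [] 0
      rw [List.foldl_map] at hB
      rw [hA, hB]
      simp only [List.nil_append, List.map_cons, pvPfx, zero_add,
        PySem.List.enumerate_cons, List.map_cons]
      rw [pvEnum_pfx]
      congr 1
      · ring
      · congr 1; ring
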